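-- pv_equiv track=rewrite | github.com/CrewRiz/bob | performance_optimizer.py | _create_batches
-- ===== SOURCE A (Python) =====
-- from typing import Dict, Any, List, Callable, Optional
--
-- def _create_batches(data: tuple, batch_size: int) -> List[tuple]:
--     """Split data into batches"""
--     if not data:
--         return []
--
--     batches = []
--     for i in range(0, len(data[0]), batch_size):
--         batch = tuple(d[i:i + batch_size] for d in data)
--         batches.append(batch)
--
--     return batches
-- ===== SOURCE B (Python) =====
-- from typing import List
--
-- def _create_batches(data: tuple, batch_size: int) -> List[tuple]:
--     """Split data into batches (per-sequence slicing, combined column-wise)."""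
--     if not data:
--         return []
--     offsets = range(0, len(data[0]), batch_size)
--     per_sequence = [[d[i:i + batch_size] for i in offsets] for d in data]
--     return list(zip(*per_sequence))
-- ===== Notes on version B (the rewrite author's own statement) =====
-- stated objective: alternative
-- what changed: B iterates over the sequences, building each sequence's list of slices once, then combines them column-wise with zip(*...), instead of A's loop over offsets that slices every sequence at each offset.
import Mathlib
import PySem

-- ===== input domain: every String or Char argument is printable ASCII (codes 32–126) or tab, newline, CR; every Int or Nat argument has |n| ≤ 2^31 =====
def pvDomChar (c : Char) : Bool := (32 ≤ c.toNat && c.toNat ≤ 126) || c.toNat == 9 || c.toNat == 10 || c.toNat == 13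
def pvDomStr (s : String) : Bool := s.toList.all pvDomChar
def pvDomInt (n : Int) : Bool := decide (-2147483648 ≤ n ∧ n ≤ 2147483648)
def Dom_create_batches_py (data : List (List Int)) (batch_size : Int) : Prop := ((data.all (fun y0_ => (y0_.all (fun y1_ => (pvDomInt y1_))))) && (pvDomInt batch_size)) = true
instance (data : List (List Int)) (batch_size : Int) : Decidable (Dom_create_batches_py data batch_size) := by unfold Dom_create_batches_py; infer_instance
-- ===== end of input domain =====

-- B loops over sequences (slices per sequence, combined column-wise with zip) instead of
-- looping over offsets and slicing all sequences per offset; objective: alternative decomposition.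
-- ===== PORT A =====
def create_batches_py (data : List (List Int)) (batch_size : Int) : List (List (List Int)) :=
  match data with
  | [] => []                                   -- if not data: return []
  | d0 :: _ =>
    -- for i in range(0, len(data[0]), batch_size): batches.append(tuple(d[i:i+batch_size] for d in data))
    (PySem.List.pyRange 0 (d0.length : Int) batch_size).foldl
      (fun batches i =>
        batches ++ [data.map (fun d => PySem.List.slice d (some i) (some (i + batch_size)))]) []

-- ===== PORT B =====
-- pyZip: Python's zip(*lists) — transpose, truncating at the shortest list.
def pyZipGo {a : Type} : List a → List (List a) → List (List a)
  | [], _ => []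
  | x :: t, rest =>
    match rest.mapM List.head? with
    | none => []
    | some hs => (x :: hs) :: pyZipGo t (rest.map List.tail)

def pyZip {a : Type} : List (List a) → List (List a)
  | [] => []
  | l0 :: rest => pyZipGo l0 rest

def create_batches_py_alt (data : List (List Int)) (batch_size : Int) : List (List (List Int)) :=
  match data with
  | [] => []
  | d0 :: _ =>
    let offsets := PySem.List.pyRange 0 (d0.length : Int) batch_size
    let perSequence := data.map (fun d =>
      offsets.map (fun i => PySem.List.slice d (some i) (some (i + batch_size))))
    pyZip perSequence

-- ===== PRECONDITION & SPEC =====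
-- Pre_ excludes only inputs where Python raises: batch_size = 0 with nonempty data (range step 0, ValueError).
def Pre_create_batches_py (data : List (List Int)) (batch_size : Int) : Prop :=
  data = [] ∨ batch_size ≠ 0
instance (data : List (List Int)) (batch_size : Int) : Decidable (Pre_create_batches_py data batch_size) := by
  unfold Pre_create_batches_py; infer_instance
def pvWitness_create_batches_py : List (List Int) × Int := ([[1, 2, 3], [4, 5]], 2)
def Spec_create_batches_py (data : List (List Int)) (batch_size : Int) (out : List (List (List Int))) : Prop := out = create_batches_py_alt data batch_size
instance (data : List (List Int)) (batch_size : Int) (out : List (List (List Int))) : Decidable (Spec_create_batches_py data batch_size out) := by unfold Spec_create_batches_py; infer_instance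

-- ===== CLAIM (what is proved, stated in full; the proofs are below) =====
def Claim_equal_create_batches_py : Prop := ∀ (data : List (List Int)) (batch_size : Int), Dom_create_batches_py data batch_size → Pre_create_batches_py data batch_size → Spec_create_batches_py data batch_size (create_batches_py data batch_size)

-- ===== LEMMAS AND PROOFS =====

theorem foldl_append_singleton {a b : Type} (f : a → b) :
    ∀ (l : List a) (acc : List b),
      l.foldl (fun bs i => bs ++ [f i]) acc = acc ++ l.map f := by
  intro l
  induction l with
  | nil => intro acc; simp
  | cons x t ih => intro acc; simp [List.foldl, ih]

theorem mapM_head_cons {a b : Type} (h : b → a) (t : b → List a) :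
    ∀ (ds : List b), (ds.map (fun d => h d :: t d)).mapM List.head? = some (ds.map h) := by
  intro ds
  induction ds with
  | nil => rfl
  | cons d rest ih => simp [List.mapM_cons, ih]

theorem pyZipGo_map {a b : Type} (g : b → Int → a) (d0 : b) :
    ∀ (offsets : List Int) (ds : List b),
      pyZipGo (offsets.map (g d0)) (ds.map (fun d => offsets.map (g d)))
        = offsets.map (fun i => g d0 i :: ds.map (fun d => g d i)) := by
  intro offsets
  induction offsets with
  | nil => intro ds; rfl
  | cons i rest ih =>
    intro ds
    simp only [List.map_cons, pyZipGo, mapM_head_cons (fun d => g d i) (fun d => rest.map (g d))]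
    have htail : (ds.map (fun d => g d i :: rest.map (g d))).map List.tail
        = ds.map (fun d => rest.map (g d)) := by
      simp [List.map_map]
    rw [htail, ih]

-- ===== VERDICT (by name: the statement is the Claim_ definition above) =====
theorem create_batches_py_spec : Claim_equal_create_batches_py := by
  intro data batch_size _hdom _hpre
  unfold Spec_create_batches_py create_batches_py create_batches_py_alt
  cases data with
  | nil => rfl
  | cons d0 ds =>
    simp only [pyZip, List.map_cons,
      pyZipGo_map (fun d i => PySem.List.slice d (some i) (some (i + batch_size))) d0,
      foldl_append_singleton, List.nil_append, List.map_cons]
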